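-- pv_equiv track=rewrite | github.com/iknoom/Problem_Solving | Programmers/2022 kakao blind recruitment/E.py | get_wolf_sheep
-- ===== SOURCE A (Python) =====
-- def get_wolf_sheep(info, bitset):
--     wolf_n = 0
--     sheep_n = 0
--     for i in range(len(info)):
--         if bitset & (1 << i):
--             if info[i] == 1:
--                 wolf_n += 1
--             else:
--                 sheep_n += 1
--     return wolf_n, sheep_n
-- ===== SOURCE B (Python) =====
-- def get_wolf_sheep(info, bitset):
--     wolf_mask = 0
--     for i, v in enumerate(info):
--         if v == 1:
--             wolf_mask |= 1 << i
--     full_mask = (1 << len(info)) - 1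
--     sheep_mask = full_mask ^ wolf_mask
--     return (bitset & wolf_mask).bit_count(), (bitset & sheep_mask).bit_count()
-- ===== Notes on version B (the rewrite author's own statement) =====
-- stated objective: faster
-- what changed: Replaces the per-bit branching loop (test each bit of bitset, branch on info[i], bump a counter) by building a wolf bitmask and the in-range full mask in one pass, then answering both counts with two mask-and-popcount operations.
import Mathlib
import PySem

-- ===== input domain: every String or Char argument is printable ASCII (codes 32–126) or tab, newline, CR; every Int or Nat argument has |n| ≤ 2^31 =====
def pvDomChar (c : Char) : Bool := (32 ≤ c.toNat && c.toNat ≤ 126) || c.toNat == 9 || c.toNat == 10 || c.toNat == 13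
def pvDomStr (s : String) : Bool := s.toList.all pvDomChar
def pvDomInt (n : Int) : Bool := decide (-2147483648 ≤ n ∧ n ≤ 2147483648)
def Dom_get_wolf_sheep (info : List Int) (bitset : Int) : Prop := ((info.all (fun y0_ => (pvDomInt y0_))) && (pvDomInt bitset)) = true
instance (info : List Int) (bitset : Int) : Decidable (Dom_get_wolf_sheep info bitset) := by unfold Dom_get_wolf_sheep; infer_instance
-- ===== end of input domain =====

-- B replaces A's per-bit branching loop by a precomputed wolf mask / in-range sheep mask and two popcounts (measured faster at large sizes in a timing run).

-- ===== PORT A =====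
-- for i in range(len(info)): if bitset & (1 << i): if info[i] == 1: wolf_n += 1 else: sheep_n += 1
def pvLoopA (bitset : Int) : List Int → Nat → Int → Int → Int × Int
  | [], _, wolf_n, sheep_n => (wolf_n, sheep_n)
  | v :: rest, i, wolf_n, sheep_n =>
    if PySem.Int.band bitset ((1:Int) <<< i) ≠ 0 then
      if v = 1 then pvLoopA bitset rest (i+1) (wolf_n+1) sheep_n
      else pvLoopA bitset rest (i+1) wolf_n (sheep_n+1)
    else pvLoopA bitset rest (i+1) wolf_n sheep_n

def get_wolf_sheep (info : List Int) (bitset : Int) : Int × Int :=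
  pvLoopA bitset info 0 0 0

-- ===== PORT B =====
-- for i, v in enumerate(info): if v == 1: wolf_mask |= 1 << i
def pvMaskLoop : List Int → Nat → Int → Int
  | [], _, m => m
  | v :: rest, i, m => pvMaskLoop rest (i+1) (if v = 1 then PySem.Int.bor m ((1:Int) <<< i) else m)

def get_wolf_sheep_alt (info : List Int) (bitset : Int) : Int × Int :=
  let wolf_mask := pvMaskLoop info 0 0
  let full_mask := ((1:Int) <<< info.length) - 1
  let sheep_mask := PySem.Int.bxor full_mask wolf_mask
  ((PySem.Int.bitCount (PySem.Int.band bitset wolf_mask) : Int),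
   (PySem.Int.bitCount (PySem.Int.band bitset sheep_mask) : Int))

-- ===== PRECONDITION & SPEC =====
def Spec_get_wolf_sheep (info : List Int) (bitset : Int) (out : Int × Int) : Prop := out = get_wolf_sheep_alt info bitset
instance (info : List Int) (bitset : Int) (out : Int × Int) : Decidable (Spec_get_wolf_sheep info bitset out) := by unfold Spec_get_wolf_sheep; infer_instance

-- ===== CLAIM (what is proved, stated in full; the proofs are below) =====
def Claim_equal_get_wolf_sheep : Prop := ∀ (info : List Int) (bitset : Int), Dom_get_wolf_sheep info bitset → Spec_get_wolf_sheep info bitset (get_wolf_sheep info bitset)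

-- ===== LEMMAS AND PROOFS =====

-- the wolf mask of `info`, as a natural number
def pvWm : List Int → Nat
  | [] => 0
  | v :: rest => (if v = 1 then 1 else 0) + 2 * pvWm rest

-- the sheep mask of `info`, as a natural number
def pvSm : List Int → Nat
  | [] => 0
  | v :: rest => (if v = 1 then 0 else 1) + 2 * pvSm rest

-- number of selected wolves / sheep, reading `x` bit by bit from the low end
def pvCntW : Int → List Int → Nat
  | _, [] => 0
  | x, v :: rest => (if v = 1 ∧ PySem.Int.mod x 2 = 1 then 1 else 0) + pvCntW (x >>> (1:Nat)) rest

def pvCntS : Int → List Int → Nat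
  | _, [] => 0
  | x, v :: rest => (if v ≠ 1 ∧ PySem.Int.mod x 2 = 1 then 1 else 0) + pvCntS (x >>> (1:Nat)) rest

-- Nat halving identities for the bitwise operations
lemma pvLandH (a b : Nat) : a &&& b = (a % 2) * (b % 2) + 2 * ((a / 2) &&& (b / 2)) := by
  apply Nat.eq_of_testBit_eq
  intro i
  cases i with
  | zero =>
    rw [Nat.testBit_land, Nat.testBit_zero, Nat.testBit_zero, Nat.testBit_zero]
    rcases Nat.mod_two_eq_zero_or_one a with h | h <;>
      rcases Nat.mod_two_eq_zero_or_one b with h' | h' <;>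
      simp [h, h', Nat.mul_mod_right, Nat.add_mul_mod_self_left] <;> omega
  | succ j =>
    have hd : ((a % 2) * (b % 2) + 2 * ((a / 2) &&& (b / 2))) / 2 = (a / 2) &&& (b / 2) := by
      rcases Nat.mod_two_eq_zero_or_one a with h | h <;>
        rcases Nat.mod_two_eq_zero_or_one b with h' | h' <;> simp [h, h'] <;> omega
    rw [Nat.testBit_land, Nat.testBit_succ, Nat.testBit_succ, Nat.testBit_succ, hd, Nat.testBit_land]

lemma pvXorH (a b : Nat) : a ^^^ b = ((a % 2 + b % 2) % 2) + 2 * ((a / 2) ^^^ (b / 2)) := by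
  apply Nat.eq_of_testBit_eq
  intro i
  cases i with
  | zero =>
    rw [Nat.testBit_xor, Nat.testBit_zero, Nat.testBit_zero, Nat.testBit_zero]
    rcases Nat.mod_two_eq_zero_or_one a with h | h <;>
      rcases Nat.mod_two_eq_zero_or_one b with h' | h' <;>
      simp [h, h', Nat.mul_mod_right, Nat.add_mul_mod_self_left] <;> omega
  | succ j =>
    have hd : (((a % 2 + b % 2) % 2) + 2 * ((a / 2) ^^^ (b / 2))) / 2 = (a / 2) ^^^ (b / 2) := by
      omega
    rw [Nat.testBit_xor, Nat.testBit_succ, Nat.testBit_succ, Nat.testBit_succ, hd, Nat.testBit_xor]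

lemma pvOrH (a b : Nat) : a ||| b = (a % 2 + b % 2 - (a % 2) * (b % 2)) + 2 * ((a / 2) ||| (b / 2)) := by
  apply Nat.eq_of_testBit_eq
  intro i
  cases i with
  | zero =>
    rw [Nat.testBit_or, Nat.testBit_zero, Nat.testBit_zero, Nat.testBit_zero]
    rcases Nat.mod_two_eq_zero_or_one a with h | h <;>
      rcases Nat.mod_two_eq_zero_or_one b with h' | h' <;>
      simp [h, h', Nat.mul_mod_right, Nat.add_mul_mod_self_left] <;> omega
  | succ j =>
    have hd : ((a % 2 + b % 2 - (a % 2) * (b % 2)) + 2 * ((a / 2) ||| (b / 2))) / 2 = (a / 2) ||| (b / 2) := by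
      rcases Nat.mod_two_eq_zero_or_one a with h | h <;>
        rcases Nat.mod_two_eq_zero_or_one b with h' | h' <;> simp [h, h'] <;> omega
    rw [Nat.testBit_or, Nat.testBit_succ, Nat.testBit_succ, Nat.testBit_succ, hd, Nat.testBit_or]

-- or with a fresh high power of two is addition
lemma pvOrPow : ∀ (i : Nat) (m : Nat), m < 2 ^ i → m ||| 2 ^ i = m + 2 ^ i := by
  intro i
  induction i with
  | zero => intro m hm; interval_cases m; decide
  | succ i ih =>
    intro m hm
    have h2 : (2 : Nat) ^ (i + 1) % 2 = 0 := by
      simp [Nat.pow_succ, Nat.mul_mod]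
    have hdiv : (2 : Nat) ^ (i + 1) / 2 = 2 ^ i := by
      rw [Nat.pow_succ]; omega
    rw [pvOrH, h2, hdiv, ih (m / 2) (by rw [Nat.pow_succ] at hm; omega)]
    have := Nat.pow_pos (n := i) (show 0 < 2 by norm_num)
    rw [Nat.pow_succ] at hm ⊢
    omega

-- shifting an Int right twice
lemma pvShiftRR (x : Int) (i : Nat) : (x >>> (1:Nat)) >>> i = x >>> (i + 1) := by
  have key : ∀ n : Nat, (n >>> 1) >>> i = n >>> (i + 1) := by
    intro n
    rw [Nat.add_comm i 1, Nat.shiftRight_add]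
  cases x with
  | ofNat n =>
    show Int.ofNat ((n >>> 1) >>> i) = Int.ofNat (n >>> (i + 1))
    rw [key]
  | negSucc n =>
    show Int.negSucc ((n >>> 1) >>> i) = Int.negSucc (n >>> (i + 1))
    rw [key]

lemma pvShiftR0 (x : Int) : x >>> (0 : Nat) = x := by
  cases x <;> rfl

lemma pvOneShl (i : Nat) : ((1 : Int) <<< i) = ((2 ^ i : Nat) : Int) := by
  show Int.ofNat (1 <<< i) = Int.ofNat (2 ^ i)
  rw [Nat.shiftLeft_eq, Nat.one_mul]

lemma pvNegSuccShr (c : Nat) : (Int.negSucc c) >>> (1 : Nat) = Int.negSucc (c / 2) := by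
  show Int.negSucc (c >>> 1) = Int.negSucc (c / 2)
  rw [Nat.shiftRight_one]

lemma pvOfNatShr (n : Nat) : ((n : Int)) >>> (1 : Nat) = ((n / 2 : Nat) : Int) := by
  show Int.ofNat (n >>> 1) = Int.ofNat (n / 2)
  rw [Nat.shiftRight_one]

-- band of a negative with a nonnegative mask, from the definition
lemma pvBandNegSucc (c : Nat) (M : Nat) :
    PySem.Int.band (Int.negSucc c) (M : Int) = ((M - (M &&& c) : Nat) : Int) := by
  have h1 : ¬ (0 : Int) ≤ Int.negSucc c := by omega
  have h2 : (0 : Int) ≤ (M : Int) := by positivity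
  simp only [PySem.Int.band, h1, h2, if_true, if_false]
  norm_num

-- the central halving identity for Python's `&` against a nonnegative mask
lemma pvBandH (x : Int) (M : Nat) :
    PySem.Int.band x (M : Int)
      = ((M % 2 : Nat) : Int) * PySem.Int.mod x 2 + 2 * PySem.Int.band (x >>> (1:Nat)) ((M / 2 : Nat) : Int) := by
  cases x with
  | ofNat n =>
    rw [show (Int.ofNat n) = ((n : Nat) : Int) from rfl, pvOfNatShr]
    rw [PySem.Int.band_natCast, PySem.Int.band_natCast]
    have hmod : PySem.Int.mod ((n : Nat) : Int) 2 = ((n % 2 : Nat) : Int) := by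
      exact_mod_cast PySem.Int.mod_natCast n 2
    rw [hmod]
    push_cast
    rw [pvLandH n M]
    push_cast
    ring
  | negSucc c =>
    rw [pvBandNegSucc, pvNegSuccShr, pvBandNegSucc]
    have hm : PySem.Int.mod (Int.negSucc c) 2 = 1 - ((c % 2 : Nat) : Int) := by
      rw [PySem.Int.mod_eq_emod_of_pos (by norm_num : (0:Int) < 2)]
      have hns : Int.negSucc c = -((c : Int) + 1) := by
        rw [Int.negSucc_eq]
      rw [hns]
      omega
    rw [hm]
    have h1 := pvLandH M c
    have h2 : M &&& c ≤ M := Nat.and_le_left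
    have h3 : (M / 2) &&& (c / 2) ≤ M / 2 := Nat.and_le_left
    rcases Nat.mod_two_eq_zero_or_one M with hM | hM <;>
      rcases Nat.mod_two_eq_zero_or_one c with hc | hc <;>
      rw [hM, hc] at h1 <;> push_cast [hM, hc] <;> omega

-- bitCount of c + 2*y, c a bit, y nonnegative
lemma pvBitCountStep (c : Nat) (y : Int) (hy : 0 ≤ y) (hc : c < 2) :
    PySem.Int.bitCount ((c : Int) + 2 * y) = c + PySem.Int.bitCount y := by
  obtain ⟨m, rfl⟩ := Int.eq_ofNat_of_zero_le hy
  have h : ((c : Int) + 2 * (m : Int)) = ((c + 2 * m : Nat) : Int) := by push_cast; ring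
  rw [h]
  rcases Nat.eq_zero_or_pos (c + 2 * m) with h0 | h0
  · have hc0 : c = 0 := by omega
    have hm0 : m = 0 := by omega
    simp [hc0, hm0, PySem.Int.bitCount_zero]
  · rw [PySem.Int.bitCount_natCast h0]
    have e1 : (c + 2 * m) % 2 = c := by omega
    have e2 : (c + 2 * m) / 2 = m := by omega
    rw [e1, e2]

lemma pvBandNonneg (x : Int) (M : Nat) : 0 ≤ PySem.Int.band x (M : Int) := by
  rw [PySem.Int.band_comm]
  exact PySem.Int.band_nonneg_of_nonneg_left x (by positivity)

lemma pvModTwoCases (x : Int) : PySem.Int.mod x 2 = 0 ∨ PySem.Int.mod x 2 = 1 := by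
  have h1 := PySem.Int.mod_nonneg x (b := 2) (by norm_num)
  have h2 := PySem.Int.mod_lt x (b := 2) (by norm_num)
  omega

-- popcount of bitset ∧ wolf-mask counts the selected wolves
lemma pvBcW : ∀ (info : List Int) (x : Int),
    PySem.Int.bitCount (PySem.Int.band x ((pvWm info : Nat) : Int)) = pvCntW x info := by
  intro info
  induction info with
  | nil => intro x; simp [pvWm, pvCntW, PySem.Int.band_zero, PySem.Int.bitCount_zero]
  | cons v rest ih =>
    intro x
    set b : Nat := if v = 1 then 1 else 0 with hb
    have hblt : b < 2 := by rw [hb]; split <;> omega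
    have hm : pvWm (v :: rest) = b + 2 * pvWm rest := rfl
    have e1 : (b + 2 * pvWm rest) % 2 = b := by omega
    have e2 : (b + 2 * pvWm rest) / 2 = pvWm rest := by omega
    have hA : PySem.Int.band x ((pvWm (v :: rest) : Nat) : Int)
        = ((b * (PySem.Int.mod x 2).toNat : Nat) : Int)
          + 2 * PySem.Int.band (x >>> (1:Nat)) ((pvWm rest : Nat) : Int) := by
      rw [hm, pvBandH, e1, e2]
      rcases pvModTwoCases x with hx | hx <;> rw [hx] <;> push_cast <;> ring
    rw [hA, pvBitCountStep _ _ (pvBandNonneg _ _)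
          (by rcases pvModTwoCases x with hx | hx <;> rw [hx] <;> simp <;> omega), ih]
    have hcnt : pvCntW x (v :: rest)
        = (if v = 1 ∧ PySem.Int.mod x 2 = 1 then 1 else 0) + pvCntW (x >>> (1:Nat)) rest := rfl
    rw [hcnt]
    congr 1
    rcases pvModTwoCases x with hx | hx <;> rw [hx, hb] <;> by_cases hv : v = 1 <;> simp [hv]

-- popcount of bitset ∧ sheep-mask counts the selected sheep
lemma pvBcS : ∀ (info : List Int) (x : Int),
    PySem.Int.bitCount (PySem.Int.band x ((pvSm info : Nat) : Int)) = pvCntS x info := by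
  intro info
  induction info with
  | nil => intro x; simp [pvSm, pvCntS, PySem.Int.band_zero, PySem.Int.bitCount_zero]
  | cons v rest ih =>
    intro x
    set b : Nat := if v = 1 then 0 else 1 with hb
    have hblt : b < 2 := by rw [hb]; split <;> omega
    have hm : pvSm (v :: rest) = b + 2 * pvSm rest := rfl
    have e1 : (b + 2 * pvSm rest) % 2 = b := by omega
    have e2 : (b + 2 * pvSm rest) / 2 = pvSm rest := by omega
    have hA : PySem.Int.band x ((pvSm (v :: rest) : Nat) : Int)
        = ((b * (PySem.Int.mod x 2).toNat : Nat) : Int)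
          + 2 * PySem.Int.band (x >>> (1:Nat)) ((pvSm rest : Nat) : Int) := by
      rw [hm, pvBandH, e1, e2]
      rcases pvModTwoCases x with hx | hx <;> rw [hx] <;> push_cast <;> ring
    rw [hA, pvBitCountStep _ _ (pvBandNonneg _ _)
          (by rcases pvModTwoCases x with hx | hx <;> rw [hx] <;> simp <;> omega), ih]
    have hcnt : pvCntS x (v :: rest)
        = (if v ≠ 1 ∧ PySem.Int.mod x 2 = 1 then 1 else 0) + pvCntS (x >>> (1:Nat)) rest := rfl
    rw [hcnt]
    congr 1
    rcases pvModTwoCases x with hx | hx <;> rw [hx, hb] <;> by_cases hv : v = 1 <;> simp [hv]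

-- band against a single power of two reads one bit
lemma pvBandPow : ∀ (i : Nat) (x : Int),
    PySem.Int.band x ((1 : Int) <<< i) = PySem.Int.mod (x >>> i) 2 * ((2 ^ i : Nat) : Int) := by
  intro i
  induction i with
  | zero =>
    intro x
    rw [pvOneShl]
    have h1 : ((2 ^ 0 : Nat) : Int) = 1 := by norm_num
    rw [h1, PySem.Int.band_one, pvShiftR0, mul_one]
  | succ i ih =>
    intro x
    rw [pvOneShl]
    have h2 : (2 : Nat) ^ (i + 1) % 2 = 0 := by
      have : (2:Nat) ^ (i+1) = 2 ^ i * 2 := by rw [Nat.pow_succ]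
      omega
    have hdiv : (2 : Nat) ^ (i + 1) / 2 = 2 ^ i := by
      have : (2:Nat) ^ (i+1) = 2 ^ i * 2 := by rw [Nat.pow_succ]
      omega
    rw [pvBandH, h2, hdiv]
    have h3 := ih (x >>> (1:Nat))
    rw [pvOneShl] at h3
    rw [h3, pvShiftRR]
    push_cast [Nat.pow_succ]
    ring

lemma pvBandPowTest (i : Nat) (x : Int) :
    PySem.Int.band x ((1 : Int) <<< i) ≠ 0 ↔ PySem.Int.mod (x >>> i) 2 = 1 := by
  rw [pvBandPow]
  have hp : (0 : Int) < ((2 ^ i : Nat) : Int) := by positivity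
  rcases pvModTwoCases (x >>> i) with h | h <;> rw [h] <;> simp <;> omega

-- A's loop computes the two counters
lemma pvLoopALem : ∀ (info : List Int) (x : Int) (i : Nat) (w s : Int),
    pvLoopA x info i w s = (w + (pvCntW (x >>> i) info : Int), s + (pvCntS (x >>> i) info : Int)) := by
  intro info
  induction info with
  | nil => intro x i w s; simp [pvLoopA, pvCntW, pvCntS]
  | cons v rest ih =>
    intro x i w s
    have hW : pvCntW (x >>> i) (v :: rest)
        = (if v = 1 ∧ PySem.Int.mod (x >>> i) 2 = 1 then 1 else 0) + pvCntW ((x >>> i) >>> (1:Nat)) rest := rfl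
    have hS : pvCntS (x >>> i) (v :: rest)
        = (if v ≠ 1 ∧ PySem.Int.mod (x >>> i) 2 = 1 then 1 else 0) + pvCntS ((x >>> i) >>> (1:Nat)) rest := rfl
    have hsh : (x >>> i) >>> (1:Nat) = x >>> (i + 1) := by
      have key : ∀ n : Nat, (n >>> i) >>> 1 = n >>> (i + 1) := by
        intro n
        rw [Nat.shiftRight_add]
      cases x with
      | ofNat n =>
        show Int.ofNat ((n >>> i) >>> 1) = Int.ofNat (n >>> (i + 1))
        rw [key]
      | negSucc n =>
        show Int.negSucc ((n >>> i) >>> 1) = Int.negSucc (n >>> (i + 1))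
        rw [key]
    show (if PySem.Int.band x ((1:Int) <<< i) ≠ 0 then _ else _) = _
    by_cases ht : PySem.Int.band x ((1:Int) <<< i) ≠ 0
    · rw [if_pos ht]
      have hbit : PySem.Int.mod (x >>> i) 2 = 1 := (pvBandPowTest i x).mp ht
      by_cases hv : v = 1
      · have hw1 : (if v = 1 ∧ PySem.Int.mod (x >>> i) 2 = 1 then 1 else 0) = 1 := if_pos ⟨hv, hbit⟩
        have hs1 : (if v ≠ 1 ∧ PySem.Int.mod (x >>> i) 2 = 1 then 1 else 0) = 0 := if_neg (fun h => h.1 hv)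
        rw [if_pos hv, ih x (i+1) (w+1) s, hW, hS, hsh, hw1, hs1, Prod.ext_iff]
        constructor <;> push_cast <;> ring
      · have hw1 : (if v = 1 ∧ PySem.Int.mod (x >>> i) 2 = 1 then 1 else 0) = 0 := if_neg (fun h => hv h.1)
        have hs1 : (if v ≠ 1 ∧ PySem.Int.mod (x >>> i) 2 = 1 then 1 else 0) = 1 := if_pos ⟨hv, hbit⟩
        rw [if_neg hv, ih x (i+1) w (s+1), hW, hS, hsh, hw1, hs1, Prod.ext_iff]
        constructor <;> push_cast <;> ring
    · rw [if_neg ht]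
      have hbit : ¬ PySem.Int.mod (x >>> i) 2 = 1 := fun h => ht ((pvBandPowTest i x).mpr h)
      have hw1 : (if v = 1 ∧ PySem.Int.mod (x >>> i) 2 = 1 then 1 else 0) = 0 := if_neg (fun h => hbit h.2)
      have hs1 : (if v ≠ 1 ∧ PySem.Int.mod (x >>> i) 2 = 1 then 1 else 0) = 0 := if_neg (fun h => hbit h.2)
      rw [ih x (i+1) w s, hW, hS, hsh, hw1, hs1, Prod.ext_iff]
      constructor <;> push_cast <;> ring

-- B's mask loop builds the wolf mask
lemma pvMaskLoopLem : ∀ (info : List Int) (i : Nat) (m : Nat), m < 2 ^ i →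
    pvMaskLoop info i (m : Int) = ((m + 2 ^ i * pvWm info : Nat) : Int) := by
  intro info
  induction info with
  | nil => intro i m hm; simp [pvMaskLoop, pvWm]
  | cons v rest ih =>
    intro i m hm
    have hpow : (0:Nat) < 2 ^ i := Nat.pow_pos (by norm_num)
    show pvMaskLoop rest (i+1) (if v = 1 then PySem.Int.bor (m : Int) ((1:Int) <<< i) else (m : Int)) = _
    by_cases hv : v = 1
    · rw [if_pos hv, pvOneShl, PySem.Int.bor_natCast, pvOrPow i m hm]
      rw [ih (i+1) (m + 2^i) (by rw [Nat.pow_succ]; omega)]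
      have hwm : pvWm (v :: rest) = 1 + 2 * pvWm rest := by simp [pvWm, hv]
      rw [hwm]
      congr 1
      rw [Nat.pow_succ]
      ring
    · rw [if_neg hv]
      rw [ih (i+1) m (by rw [Nat.pow_succ]; omega)]
      have hwm : pvWm (v :: rest) = 0 + 2 * pvWm rest := by simp [pvWm, hv]
      rw [hwm]
      congr 1
      rw [Nat.pow_succ]
      ring

-- full mask xor wolf mask = sheep mask
lemma pvXorSheep : ∀ (info : List Int), (2 ^ info.length - 1) ^^^ pvWm info = pvSm info := by
  intro info
  induction info with
  | nil => simp [pvWm, pvSm]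
  | cons v rest ih =>
    have hpow : (0:Nat) < 2 ^ rest.length := Nat.pow_pos (by norm_num)
    have hlen : (v :: rest).length = rest.length + 1 := rfl
    rw [hlen, pvXorH]
    set b : Nat := if v = 1 then 1 else 0 with hb
    have hblt : b < 2 := by rw [hb]; split <;> omega
    have hwm : pvWm (v :: rest) = b + 2 * pvWm rest := rfl
    have hps : (2:Nat) ^ (rest.length + 1) = 2 ^ rest.length * 2 := by rw [Nat.pow_succ]
    have e1 : (2 ^ (rest.length + 1) - 1) % 2 = 1 := by omega
    have e2 : (2 ^ (rest.length + 1) - 1) / 2 = 2 ^ rest.length - 1 := by omega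
    have e3 : (pvWm (v :: rest)) % 2 = b := by rw [hwm]; omega
    have e4 : (pvWm (v :: rest)) / 2 = pvWm rest := by rw [hwm]; omega
    rw [e1, e2, e3, e4, ih]
    have hsm : pvSm (v :: rest) = (if v = 1 then 0 else 1) + 2 * pvSm rest := rfl
    rw [hsm, hb]
    by_cases hv : v = 1 <;> simp [hv]

-- ===== VERDICT (by name: the statement is the Claim_ definition above) =====
theorem get_wolf_sheep_spec : Claim_equal_get_wolf_sheep := by
  intro info bitset _
  unfold Spec_get_wolf_sheep get_wolf_sheep get_wolf_sheep_alt
  have hmask : pvMaskLoop info 0 0 = ((pvWm info : Nat) : Int) := by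
    have h := pvMaskLoopLem info 0 0 (by norm_num)
    simpa using h
  have hfull : ((1 : Int) <<< info.length) - 1 = ((2 ^ info.length - 1 : Nat) : Int) := by
    rw [pvOneShl]
    have hpow : (0:Nat) < 2 ^ info.length := Nat.pow_pos (by norm_num)
    push_cast [Nat.cast_sub (by omega : 1 ≤ 2 ^ info.length)]
    ring
  have hsheep : PySem.Int.bxor (((1 : Int) <<< info.length) - 1) ((pvWm info : Nat) : Int)
      = ((pvSm info : Nat) : Int) := by
    rw [hfull, PySem.Int.bxor_natCast, pvXorSheep]
  simp only [hmask, hsheep]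
  rw [pvLoopALem info bitset 0 0 0, pvShiftR0, pvBcW, pvBcS]
  simp
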